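-- pv_equiv track=rewrite | github.com/Rajeev12R/Resume-Score-Checker | ai-server/sectioner/jd_sectioner.py | split_jd_sections
-- ===== SOURCE A (Python) =====
-- JD_SECTIONS = {
--     "company_name": ["company", "organization", "employer"],
--     "role": ["role", "position", "designation"],
--     "responsibilities": ["responsibilities", "job description", "tasks"],
--     "skills_needed": ["skills", "requirements", "technical skills"],
--     "experience_needed": ["experience", "years of experience"],
--     "achievements_focus": ["achievements", "recognition", "awards"],
--     "eligibility": ["eligibility", "qualifications", "criteria"]
-- }
--
-- def split_jd_sections(text):
--     lines = text.split("\n")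
--     sections = {k: "" for k in JD_SECTIONS}
--     current_section = None
--
--     for line in lines:
--         line = line.strip()
--         if not line:
--             continue
--
--         for key, phrases in JD_SECTIONS.items():
--             for phrase in phrases:
--                 if phrase.lower() in line.lower():
--                     current_section = key
--                     break
--
--         if current_section:
--             sections[current_section] += line + "\n"
--
--     return sections
-- ===== SOURCE B (Python) =====
-- JD_SECTIONS = {
--     "company_name": ["company", "organization", "employer"],
--     "role": ["role", "position", "designation"],
--     "responsibilities": ["responsibilities", "job description", "tasks"],
--     "skills_needed": ["skills", "requirements", "technical skills"],
--     "experience_needed": ["experience", "years of experience"],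
--     "achievements_focus": ["achievements", "recognition", "awards"],
--     "eligibility": ["eligibility", "qualifications", "criteria"]
-- }
--
-- def _match(line):
--     # last key (in dict order) one of whose phrases occurs in the line, else None
--     low = line.lower()
--     hits = [k for k, ps in JD_SECTIONS.items() if any(p.lower() in low for p in ps)]
--     return hits[-1] if hits else None
--
-- def split_jd_sections(text):
--     # segmentation: a matched line opens a block that runs until the next matched
--     # line; each block is sliced out whole and appended to its section's bucket.
--     lines = [s for s in (raw.strip() for raw in text.split("\n")) if s]
--     marks = [(i, m) for i, m in enumerate(map(_match, lines)) if m is not None]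
--     bounds = [i for i, _ in marks[1:]] + [len(lines)]
--     sections = {k: "" for k in JD_SECTIONS}
--     for (start, key), end in zip(marks, bounds):
--         for l in lines[start:end]:
--             sections[key] += l + "\n"
--     return sections
-- ===== Notes on version B (the rewrite author's own statement) =====
-- stated objective: alternative
-- what changed: A's single stateful pass (per-line keyword rescan with a carried current-section label and in-loop stripping) is replaced by segmentation: B precomputes the list of matched-line positions (marks), pairs each mark with the next mark's index as a block boundary, and slices each block out of the cleaned line list wholesale into its section's bucket - no carried label and no forward fill exist in B.
import Mathlib
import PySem

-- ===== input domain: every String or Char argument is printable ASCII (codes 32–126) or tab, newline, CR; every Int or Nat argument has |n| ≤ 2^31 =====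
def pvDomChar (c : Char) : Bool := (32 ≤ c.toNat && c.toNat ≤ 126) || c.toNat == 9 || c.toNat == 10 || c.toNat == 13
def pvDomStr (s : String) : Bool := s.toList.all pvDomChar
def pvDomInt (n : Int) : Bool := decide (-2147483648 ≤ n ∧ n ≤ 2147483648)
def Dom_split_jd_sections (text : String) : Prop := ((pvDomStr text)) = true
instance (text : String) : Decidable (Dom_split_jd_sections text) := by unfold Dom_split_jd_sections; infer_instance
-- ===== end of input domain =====

-- B replaces A's single stateful pass (per-line keyword rescan with a carried section
-- label) by segmentation: it precomputes the matched-line positions, pairs each with the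
-- next one as a block boundary, and slices each block wholesale into its section's
-- bucket; objective: alternative algorithm, same cost.

-- ===== PORT A =====
def jdSections : List (String × List String) :=
  [("company_name", ["company", "organization", "employer"]),
   ("role", ["role", "position", "designation"]),
   ("responsibilities", ["responsibilities", "job description", "tasks"]),
   ("skills_needed", ["skills", "requirements", "technical skills"]),
   ("experience_needed", ["experience", "years of experience"]),
   ("achievements_focus", ["achievements", "recognition", "awards"]),
   ("eligibility", ["eligibility", "qualifications", "criteria"])]

def split_jd_sections (text : String) : List (String × String) :=
  let lines := (PySem.Str.split? text "\n").getD []   -- sep = "\n" ≠ "", so split? is some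
  let sections : PySem.Dict String String :=
    PySem.Dict.ofList (jdSections.map (fun kp => (kp.1, "")))
  let final := lines.foldl
    (fun (st : PySem.Dict String String × Option String) rawLine =>
      let line := PySem.Str.strip rawLine
      if line = "" then st
      else
        -- for key, phrases in JD_SECTIONS.items(): for phrase: if match, set & break
        let cur := jdSections.foldl
          (fun cur kp =>
            if kp.2.any (fun phrase =>
                PySem.Str.isIn (PySem.Str.lower phrase) (PySem.Str.lower line)) then
              some kp.1
            else cur) st.2
        match cur with
        | some k => (st.1.modify k "" (fun s => s ++ line ++ "\n"), cur)
        | none => (st.1, cur))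
    (sections, none)
  final.1.items

-- ===== PORT B =====
-- _match: last key (in table order) one of whose phrases occurs in the line, else None
def matchKey (line : String) : Option String :=
  let low := PySem.Str.lower line
  ((jdSections.filter (fun kp =>
      kp.2.any (fun p => PySem.Str.isIn (PySem.Str.lower p) low))).map (·.1)).getLast?

def split_jd_sections_alt (text : String) : List (String × String) :=
  -- lines = [s for s in (raw.strip() for raw in text.split("\n")) if s]
  let lines := (((PySem.Str.split? text "\n").getD []).map PySem.Str.strip).filter
      (fun s => s != "")
  -- marks = [(i, m) for i, m in enumerate(map(_match, lines)) if m is not None]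
  let marks := (PySem.List.enumerate (lines.map matchKey) 0).filterMap
      (fun im => im.2.map (fun k => (im.1, k)))
  -- bounds = [i for i, _ in marks[1:]] + [len(lines)]
  let bounds := (marks.drop 1).map (·.1) ++ [(lines.length : Int)]
  let sections : PySem.Dict String String :=
    PySem.Dict.ofList (jdSections.map (fun kp => (kp.1, "")))
  -- for (start, key), end in zip(marks, bounds): for l in lines[start:end]: append
  ((marks.zip bounds).foldl
    (fun d p =>
      (PySem.List.slice lines (some p.1.1) (some p.2)).foldl
        (fun d l => d.modify p.1.2 "" (fun s => s ++ l ++ "\n")) d)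
    sections).items

-- ===== PRECONDITION & SPEC =====
def Spec_split_jd_sections (text : String) (out : List (String × String)) : Prop := out = split_jd_sections_alt text
instance (text : String) (out : List (String × String)) : Decidable (Spec_split_jd_sections text out) := by unfold Spec_split_jd_sections; infer_instance

-- ===== CLAIM (what is proved, stated in full; the proofs are below) =====
def Claim_equal_split_jd_sections : Prop := ∀ (text : String), Dom_split_jd_sections text → Spec_split_jd_sections text (split_jd_sections text)

-- ===== LEMMAS AND PROOFS =====

-- proof-side name for A's loop body (definitionally the port's lambda)
def stepA (st : PySem.Dict String String × Option String) (rawLine : String) :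
    PySem.Dict String String × Option String :=
  let line := PySem.Str.strip rawLine
  if line = "" then st
  else
    let cur := jdSections.foldl
      (fun cur kp =>
        if kp.2.any (fun phrase =>
            PySem.Str.isIn (PySem.Str.lower phrase) (PySem.Str.lower line)) then
          some kp.1
        else cur) st.2
    match cur with
    | some k => (st.1.modify k "" (fun s => s ++ line ++ "\n"), cur)
    | none => (st.1, cur)

-- A's body on an already-stripped, non-empty line, with the rescan replaced by matchKey
def stepC (st : PySem.Dict String String × Option String) (line : String) :
    PySem.Dict String String × Option String :=
  match (matchKey line).or st.2 with
  | some k => (st.1.modify k "" (fun s => s ++ line ++ "\n"), some k)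
  | none => (st.1, none)

-- bucketing one labelled line
def stepD (d : PySem.Dict String String) (p : String × String) : PySem.Dict String String :=
  d.modify p.1 "" (fun s => s ++ p.2 ++ "\n")

-- the labelled-line sequence A's forward-filled state produces (proof-side spec)
def labSeq : Option String → List String → List (String × String)
  | _, [] => []
  | c, l :: ls =>
    match (matchKey l).or c with
    | some k => (k, l) :: labSeq (some k) ls
    | none => labSeq none ls

-- B's mark list, on Nat indices
def marksN : Nat → List String → List (Nat × String)
  | _, [] => []
  | s, l :: ls =>
    match matchKey l with
    | some k => (s, k) :: marksN (s + 1) ls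
    | none => marksN (s + 1) ls

def pairsN (s : Nat) (L : List String) (flen : Nat) : List ((Nat × String) × Nat) :=
  (marksN s L).zip (((marksN s L).drop 1).map (·.1) ++ [flen])

-- one (mark, bound) step of B's fold, on Nat indices
def segFold (F : List String) (d : PySem.Dict String String) (p : (Nat × String) × Nat) :
    PySem.Dict String String :=
  ((F.drop p.1.1).take (p.2 - p.1.1)).foldl
    (fun d l => d.modify p.1.2 "" (fun s => s ++ l ++ "\n")) d

-- A's "last match wins" fold over the table = first match in the reversed table, else carry
theorem lastMatch_foldl (L : List (String × List String)) (p : String × List String → Bool)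
    (c : Option String) :
    L.foldl (fun cur kp => if p kp then some kp.1 else cur) c
      = ((L.reverse.find? p).map (·.1)).or c := by
  induction L using List.reverseRecOn generalizing c with
  | nil => simp
  | append_singleton xs x ih =>
    simp only [List.foldl_append, List.foldl_cons, List.foldl_nil, List.reverse_append,
      List.reverse_cons, List.reverse_nil, List.nil_append, List.cons_append, List.find?_cons]
    by_cases h : p x = true
    · simp [h]
    · simp only [Bool.not_eq_true] at h
      simp [h, ih]

-- getLast? of a filtered projection = find? over the reverse
theorem getLast_filter_map {α β : Type} (L : List α) (p : α → Bool) (f : α → β) :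
    ((L.filter p).map f).getLast? = (L.reverse.find? p).map f := by
  rw [List.getLast?_map, ← List.head?_reverse, ← List.filter_reverse, List.head?_filter]

-- the fold A runs over the keyword table computes matchKey, forward-filled
theorem curEq (line : String) (c : Option String) :
    jdSections.foldl
      (fun cur kp =>
        if kp.2.any (fun phrase =>
            PySem.Str.isIn (PySem.Str.lower phrase) (PySem.Str.lower line)) then
          some kp.1
        else cur) c
      = (matchKey line).or c := by
  rw [lastMatch_foldl]
  show _ = (((jdSections.filter _).map _).getLast?).or _
  rw [getLast_filter_map]

theorem stepA_skip (st : PySem.Dict String String × Option String) (raw : String)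
    (h : PySem.Str.strip raw = "") : stepA st raw = st := by
  simp [stepA, h]

theorem stepA_keep (st : PySem.Dict String String × Option String) (raw : String)
    (h : ¬ PySem.Str.strip raw = "") : stepA st raw = stepC st (PySem.Str.strip raw) := by
  simp only [stepA, if_neg h, curEq, stepC]
  cases hm : (matchKey (PySem.Str.strip raw)).or st.2 <;> simp

-- A's fold over raw lines = the same fold over the stripped non-empty lines
theorem stripFilter (raws : List String) (st : PySem.Dict String String × Option String) :
    raws.foldl stepA st
      = (((raws.map PySem.Str.strip).filter (fun s => s != "")).foldl stepC st) := by
  induction raws generalizing st with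
  | nil => rfl
  | cons r rs ih =>
    simp only [List.map_cons, List.filter_cons, List.foldl_cons]
    by_cases h : PySem.Str.strip r = ""
    · rw [stepA_skip _ _ h, h]
      simp only [bne_self_eq_false, Bool.false_eq_true, if_false]
      exact ih st
    · rw [stepA_keep _ _ h]
      have hne : (PySem.Str.strip r != "") = true := by simpa using h
      simp only [hne, if_true, List.foldl_cons]
      exact ih _

-- A's stripped fold buckets exactly the labelled-line sequence
theorem A_lab (L : List String) (d : PySem.Dict String String) (c : Option String) :
    (L.foldl stepC (d, c)).1 = (labSeq c L).foldl stepD d := by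
  induction L generalizing d c with
  | nil => rfl
  | cons l ls ih =>
    rw [List.foldl_cons]
    cases hm : (matchKey l).or c with
    | some k =>
      have h1 : stepC (d, c) l = (d.modify k "" (fun s => s ++ l ++ "\n"), some k) := by
        simp [stepC, hm]
      have h2 : labSeq c (l :: ls) = (k, l) :: labSeq (some k) ls := by
        simp [labSeq, hm]
      rw [h1, h2, List.foldl_cons]
      exact ih _ _
    | none =>
      have h1 : stepC (d, c) l = (d, none) := by simp [stepC, hm]
      have h2 : labSeq c (l :: ls) = labSeq none ls := by simp [labSeq, hm]
      rw [h1, h2]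
      exact ih _ _

-- B's filterMap-over-enumerate marks are marksN (Int indices are Nat casts)
theorem marksOf_eq (xs : List String) : ∀ (s : Nat),
    (PySem.List.enumerate (xs.map matchKey) (s : Int)).filterMap
        (fun im => im.2.map (fun k => (im.1, k)))
      = (marksN s xs).map (fun p => (((p.1 : Nat) : Int), p.2)) := by
  induction xs with
  | nil => intro s; rfl
  | cons x xs ih =>
    intro s
    rw [List.map_cons, PySem.List.enumerate_cons, List.filterMap_cons]
    have hcast : ((s : Int) + 1) = (((s + 1 : Nat)) : Int) := by push_cast; ring
    cases hm : matchKey x with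
    | some k =>
      simp only [marksN, hm, Option.map_some, hcast, ih (s + 1), List.map_cons]
    | none =>
      simp only [marksN, hm, Option.map_none, hcast, ih (s + 1)]

-- unmatched lines contribute no marks
theorem marksN_unmatched (u : List String) : ∀ (t : Nat) (rest : List String),
    (∀ x ∈ u, matchKey x = none) → marksN t (u ++ rest) = marksN (t + u.length) rest := by
  induction u with
  | nil => intro t rest _; simp
  | cons a u ih =>
    intro t rest h
    have ha : matchKey a = none := h a (by simp)
    rw [List.cons_append]
    simp only [marksN, ha]
    rw [ih (t + 1) rest (fun x hx => h x (by simp [hx]))]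
    congr 1
    simp [List.length_cons]
    omega

-- unmatched lines inherit the carried label
theorem labSeq_unmatched (u : List String) : ∀ (k : String) (rest : List String),
    (∀ x ∈ u, matchKey x = none) →
    labSeq (some k) (u ++ rest) = u.map (fun x => (k, x)) ++ labSeq (some k) rest := by
  induction u with
  | nil => intro k rest _; rfl
  | cons a u ih =>
    intro k rest h
    have ha : matchKey a = none := h a (by simp)
    rw [List.cons_append]
    simp only [labSeq, ha, Option.none_or, List.map_cons, List.cons_append]
    rw [ih k rest (fun x hx => h x (by simp [hx]))]

-- a matched head makes the carried label irrelevant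
theorem labSeq_matched_head (r0 : String) (rs : List String) (k0 : String)
    (h : matchKey r0 = some k0) (c : Option String) :
    labSeq c (r0 :: rs) = (k0, r0) :: labSeq (some k0) rs := by
  simp [labSeq, h]

-- the head of dropWhile fails the predicate
theorem dropWhile_head_false {α : Type} (q : α → Bool) :
    ∀ (ls : List α) (r0 : α) (rs : List α), ls.dropWhile q = r0 :: rs → q r0 = false := by
  intro ls
  induction ls with
  | nil => intro r0 rs h; simp at h
  | cons a t ih =>
    intro r0 rs h
    by_cases hqa : q a
    · rw [List.dropWhile_cons, if_pos hqa] at h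
      exact ih _ _ h
    · rw [List.dropWhile_cons, if_neg hqa] at h
      cases h
      simpa using hqa

-- MAIN: B's zip-of-marks fold buckets the labelled-line sequence
theorem main_fold : ∀ (n : Nat) (L F : List String) (s : Nat) (d : PySem.Dict String String),
    F.drop s = L → s ≤ F.length → L.length ≤ n →
    (pairsN s L F.length).foldl (segFold F) d = (labSeq none L).foldl stepD d := by
  intro n
  induction n with
  | zero =>
    intro L F s d hdrop _ hlen
    cases L with
    | nil => rfl
    | cons l ls => simp at hlen
  | succ n ih =>
    intro L F s d hdrop hs hlen
    cases L with
    | nil => rfl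
    | cons l ls =>
      have hFlen : F.length = s + ls.length + 1 := by
        have h1 := List.length_drop (l := F) (i := s)
        rw [hdrop] at h1
        simp at h1
        omega
      have hdrop1 : F.drop (s + 1) = ls := by
        have h2 : F.drop (s + 1) = (F.drop s).drop 1 := by
          rw [List.drop_drop]
        rw [h2, hdrop]
        rfl
      cases hm : matchKey l with
      | none =>
        have hpairs : pairsN s (l :: ls) F.length = pairsN (s + 1) ls F.length := by
          unfold pairsN
          simp only [marksN, hm]
        have hlab : labSeq none (l :: ls) = labSeq none ls := by
          simp [labSeq, hm]
        rw [hpairs, hlab]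
        exact ih ls F (s + 1) d hdrop1 (by omega) (by simpa using hlen)
      | some k =>
        -- split ls into its unmatched prefix p and remainder r
        set q : String → Bool := fun x => (matchKey x).isNone with hq
        set p := ls.takeWhile q with hp
        set r := ls.dropWhile q with hr
        have hpr : p ++ r = ls := List.takeWhile_append_dropWhile
        have hpm : ∀ x ∈ p, matchKey x = none := by
          intro x hx
          have hx2 := List.mem_takeWhile_imp (hp ▸ hx)
          simpa [hq, Option.isNone_iff_eq_none] using hx2
        have hM : marksN (s + 1) ls = marksN (s + 1 + p.length) r := by
          rw [← hpr]
          exact marksN_unmatched p (s + 1) r hpm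
        have htake : (l :: ls).take (1 + p.length) = l :: p := by
          have ht : ls.take p.length = p := by
            conv_lhs => rw [← hpr]
            exact List.take_left
          rw [show 1 + p.length = p.length + 1 by omega]
          rw [List.take_succ_cons, ht]
        have hdropE : F.drop (s + 1 + p.length) = r := by
          have h1 : F.drop (s + 1 + p.length) = (F.drop (s + 1)).drop p.length := by
            rw [List.drop_drop]
            try congr 1
            try omega
          rw [h1, hdrop1, ← hpr]
          exact List.drop_left
        have hseg : segFold F d ((s, k), s + 1 + p.length)
            = (l :: p).foldl (fun d x => d.modify k "" (fun s => s ++ x ++ "\n")) d := by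
          unfold segFold
          simp only
          rw [show s + 1 + p.length - s = 1 + p.length by omega, hdrop, htake]
        have hlab : labSeq none (l :: ls)
            = ((k, l) :: p.map (fun x => (k, x))) ++ labSeq (some k) r := by
          simp only [labSeq, hm, Option.some_or]
          rw [← hpr, labSeq_unmatched p k r hpm]
          rfl
        have hbucket : ∀ d', ((k, l) :: p.map (fun x => (k, x))).foldl stepD d'
            = (l :: p).foldl (fun d x => d.modify k "" (fun s => s ++ x ++ "\n")) d' := by
          intro d'
          rw [List.foldl_cons, List.foldl_cons, List.foldl_map]
          rfl
        have hple : p.length + r.length = ls.length := by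
          rw [← List.length_append, hpr]
        have hrlen : r.length ≤ n := by
          have h2 : ls.length ≤ n := by simpa using hlen
          omega
        cases hrc : r with
        | nil =>
          -- single block running to the end of the lines
          have hls : ls = p := by rw [← hpr, hrc, List.append_nil]
          have hFe : F.length = s + 1 + p.length := by
            rw [hFlen, hls]; omega
          have hpairs : pairsN s (l :: ls) F.length = [((s, k), s + 1 + p.length)] := by
            unfold pairsN
            simp only [marksN, hm]
            rw [hM, hrc]
            simp [marksN, hFe]
          rw [hpairs, List.foldl_cons, List.foldl_nil, hseg, hlab, hrc, List.foldl_append,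
            hbucket]
          rfl
        | cons r0 rs =>
          have hqr0 : q r0 = false := dropWhile_head_false q ls r0 rs (by rw [← hr, hrc])
          have hr0 : ∃ k0, matchKey r0 = some k0 := by
            cases hmr : matchKey r0 with
            | none => rw [hq] at hqr0; simp [hmr] at hqr0
            | some k0 => exact ⟨k0, rfl⟩
          obtain ⟨k0, hk0⟩ := hr0
          have hMr : marksN (s + 1 + p.length) r
              = (s + 1 + p.length, k0) :: marksN (s + 1 + p.length + 1) rs := by
            rw [hrc]
            simp only [marksN, hk0]
          have hpairs : pairsN s (l :: ls) F.length
              = ((s, k), s + 1 + p.length) :: pairsN (s + 1 + p.length) r F.length := by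
            unfold pairsN
            simp only [marksN, hm]
            rw [hM, hMr]
            rfl
          rw [hpairs, List.foldl_cons, hseg]
          rw [ih r F (s + 1 + p.length) _ hdropE (by rw [hFlen]; omega) hrlen]
          rw [hlab, List.foldl_append, hbucket]
          congr 1
          rw [hrc, labSeq_matched_head r0 rs k0 hk0 (some k),
            labSeq_matched_head r0 rs k0 hk0 none]

-- the ports, rewritten through the proof-side names
theorem portA_eq (text : String) :
    split_jd_sections text
      = ((((PySem.Str.split? text "\n").getD []).foldl stepA
          (PySem.Dict.ofList (jdSections.map (fun kp => (kp.1, ""))), none)).1).items := rfl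

theorem portB_eq (text : String) :
    split_jd_sections_alt text
      = ((pairsN 0 ((((PySem.Str.split? text "\n").getD []).map PySem.Str.strip).filter (fun s => s != ""))
            ((((PySem.Str.split? text "\n").getD []).map PySem.Str.strip).filter (fun s => s != "")).length).foldl
          (segFold ((((PySem.Str.split? text "\n").getD []).map PySem.Str.strip).filter (fun s => s != "")))
          (PySem.Dict.ofList (jdSections.map (fun kp => (kp.1, ""))))).items := by
  unfold split_jd_sections_alt
  simp only
  generalize (((PySem.Str.split? text "\n").getD []).map PySem.Str.strip).filter (fun s => s != "") = L
  congr 1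
  have hmarks : (PySem.List.enumerate (L.map matchKey) 0).filterMap
      (fun im => im.2.map (fun k => (im.1, k)))
      = (marksN 0 L).map (fun p => (((p.1 : Nat) : Int), p.2)) := by
    have h0 := marksOf_eq L 0
    simpa using h0
  rw [hmarks]
  have hbounds : ((((marksN 0 L).map (fun p => (((p.1 : Nat) : Int), p.2))).drop 1).map (·.1))
        ++ [(L.length : Int)]
      = (((marksN 0 L).drop 1).map (·.1) ++ [L.length]).map (fun n : Nat => (n : Int)) := by
    rw [← List.map_drop, List.map_map, List.map_append, List.map_map]
    rfl
  rw [hbounds, List.zip_map, List.foldl_map]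
  unfold pairsN segFold
  congr 1
  funext d w
  simp only [Prod.map]
  rw [PySem.List.slice_natCast]

-- ===== VERDICT (by name: the statement is the Claim_ definition above) =====
theorem split_jd_sections_spec : Claim_equal_split_jd_sections := by
  intro text _
  show split_jd_sections text = split_jd_sections_alt text
  rw [portA_eq, portB_eq, stripFilter]
  congr 1
  rw [A_lab]
  exact (main_fold (((((PySem.Str.split? text "\n").getD []).map PySem.Str.strip).filter (fun s => s != ""))).length _ _ 0 _ rfl (by omega) le_rfl).symm
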